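-- pv_equiv track=rewrite | github.com/fdebrus/Nikobus-HA | custom_components/nikobus/discovery/protocol.py | _normalize_key_index
-- ===== SOURCE A (Python) =====
-- def _normalize_key_index(key_raw, num_channels, key_mapping_module):
--     """Normalize raw nibble-based key values into mapping indexes.
--
--     Roller modules report the key nibble (e.g. 0x8/0x4/0xD) instead of the
--     zero-based index expected by :data:`KEY_MAPPING_MODULE`. This helper keeps
--     valid indexes as-is, otherwise it builds an inverse lookup of the mapping
--     values and resolves the nibble to the proper index. If the button channel
--     count is unknown we try all mappings and only accept an unambiguous match.
--     """
--
--     if key_raw is None: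
--         return None, num_channels, []
--
--     inverse_mappings = {
--         channels: {value.upper(): index for index, value in mapping.items()}
--         for channels, mapping in key_mapping_module.items()
--     }
--
--     # Already a valid index for the detected channel count.
--     if num_channels in key_mapping_module and key_raw in key_mapping_module[num_channels]:
--         return key_raw, num_channels, [(num_channels, key_raw, "index")]
--
--     nibble_hex = f"{int(key_raw):X}".upper()
--
--     # Channel-count-specific inverse lookup first.
--     if num_channels in inverse_mappings and nibble_hex in inverse_mappings[num_channels]:
--         normalized_key = inverse_mappings[num_channels][nibble_hex]
--         return normalized_key, num_channels, [(num_channels, normalized_key, "inverse")]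
--
--     # Fallback: try all mappings, but only accept when unambiguous.
--     matches = [
--         (channels, inverse_mappings[channels][nibble_hex], "inverse")
--         for channels in inverse_mappings
--         if nibble_hex in inverse_mappings[channels]
--     ]
--
--     if len(matches) == 1:
--         return matches[0][1], matches[0][0], matches
--
--     return key_raw, num_channels, matches
-- ===== SOURCE B (Python) =====
-- def _normalize_key_index(key_raw, num_channels, key_mapping_module):
--     """Single sweep over all mappings collecting everything A's branches need,
--     then one decision chain; no inverse dictionaries are built."""
--     if key_raw is None:
--         return None, num_channels, []
--
--     nibble_hex = f"{int(key_raw):X}"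
--
--     index_hit = None   # channel count for which key_raw is already a valid index
--     nc_hit = None      # (channels, index): inverse hit for the detected channel count
--     matches = []       # (channels, index, "inverse") for every mapping containing the nibble
--
--     for channels, mapping in key_mapping_module.items():
--         hit = None
--         for index, value in mapping.items():
--             if channels == num_channels and index == key_raw:
--                 index_hit = channels
--             if value.upper() == nibble_hex:
--                 hit = index          # last match wins (dict-overwrite semantics)
--         if hit is not None:
--             matches.append((channels, hit, "inverse"))
--             if channels == num_channels:
--                 nc_hit = (channels, hit)
--
--     if index_hit is not None:
--         return key_raw, index_hit, [(index_hit, key_raw, "index")]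
--     if nc_hit is not None:
--         return nc_hit[1], nc_hit[0], [(nc_hit[0], nc_hit[1], "inverse")]
--     if len(matches) == 1:
--         return matches[0][1], matches[0][0], matches
--     return key_raw, num_channels, matches
-- ===== Notes on version B (the rewrite author's own statement) =====
-- stated objective: alternative
-- what changed: Replaces A's eager per-channel inverse-dictionary construction and early-return branch chain by a single sweep over all mapping entries that accumulates, in one pass, the valid-index hit, the channel-specific last inverse match and the full match list, followed by one pure decision chain over those accumulators.
import Mathlib
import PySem

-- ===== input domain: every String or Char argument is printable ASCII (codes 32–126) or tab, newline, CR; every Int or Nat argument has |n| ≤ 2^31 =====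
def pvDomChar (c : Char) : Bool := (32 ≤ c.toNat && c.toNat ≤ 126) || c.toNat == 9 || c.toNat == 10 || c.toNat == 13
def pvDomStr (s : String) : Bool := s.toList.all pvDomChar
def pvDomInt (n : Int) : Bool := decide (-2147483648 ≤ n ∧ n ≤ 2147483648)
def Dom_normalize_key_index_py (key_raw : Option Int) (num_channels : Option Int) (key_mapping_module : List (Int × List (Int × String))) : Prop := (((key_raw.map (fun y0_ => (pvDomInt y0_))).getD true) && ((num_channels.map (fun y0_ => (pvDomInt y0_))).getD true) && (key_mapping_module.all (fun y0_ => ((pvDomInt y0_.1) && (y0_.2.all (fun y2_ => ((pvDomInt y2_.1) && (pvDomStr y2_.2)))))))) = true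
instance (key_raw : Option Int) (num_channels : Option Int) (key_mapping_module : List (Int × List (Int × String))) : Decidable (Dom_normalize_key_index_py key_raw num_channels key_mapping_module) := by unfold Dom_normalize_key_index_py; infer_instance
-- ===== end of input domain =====

-- B replaces A's eager inverse-dictionary construction and branch-specific lookups by one
-- sweep over all mapping entries accumulating the three facts the decision needs, then a
-- pure decision chain (objective: alternative; return value only, no mutation involved).

-- shared primitive: exact hand port of Python's f"{n:X}" (PySem has no hex formatter);
-- uppercase hex digits, '-' in front for negatives
def hexDigitU (n : Nat) : Char := if n < 10 then Char.ofNat (48 + n) else Char.ofNat (55 + n)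

def natHexChars (n : Nat) : List Char :=
  if _h : n < 16 then [hexDigitU n]
  else natHexChars (n / 16) ++ [hexDigitU (n % 16)]
decreasing_by exact Nat.div_lt_self (by omega) (by omega)

def pyHexUpper (i : Int) : String :=
  if i < 0 then String.ofList ('-' :: natHexChars (-i).toNat) else String.ofList (natHexChars i.toNat)

-- ===== PORT A =====
-- {value.upper(): index for index, value in mapping.items()}
def invertMapping (m : PySem.Dict Int String) : PySem.Dict String Int :=
  m.items.foldl (fun a q => a.insert (PySem.Str.upper q.2) q.1) PySem.Dict.empty

-- A's fallback: the `matches` comprehension over all inverse mappings plus the unambiguity rule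
def fallbackA (kr : Int) (num_channels : Option Int) (nib : String)
    (inv : PySem.Dict Int (PySem.Dict String Int)) :
    Option Int × Option Int × (List (Int × Int × String)) :=
  let ms := inv.items.filterMap fun p =>
    match p.2.get? nib with
    | some i => some (p.1, i, "inverse")
    | none => none
  match ms with
  | [m] => (some m.2.1, some m.1, [m])
  | _ => (some kr, num_channels, ms)

def normalize_key_index_py (key_raw : Option Int) (num_channels : Option Int) (key_mapping_module : List (Int × List (Int × String))) : Option Int × Option Int × (List (Int × Int × String)) :=
  match key_raw with
  | none => (none, num_channels, [])
  | some kr =>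
    let d : PySem.Dict Int (PySem.Dict Int String) :=
      PySem.Dict.ofList (key_mapping_module.map fun p => (p.1, PySem.Dict.ofList p.2))
    let inv : PySem.Dict Int (PySem.Dict String Int) :=
      PySem.Dict.ofList (d.items.map fun p => (p.1, invertMapping p.2))
    let nib := PySem.Str.upper (pyHexUpper kr)
    match num_channels with
    | none => fallbackA kr none nib inv
    | some n =>
      -- num_channels in key_mapping_module and key_raw in key_mapping_module[num_channels]
      let hit1 : Bool := match d.get? n with
        | some m => m.contains kr
        | none => false
      if hit1 then (some kr, some n, [(n, kr, "index")])
      else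
        -- num_channels in inverse_mappings and nibble_hex in inverse_mappings[num_channels]
        let r? : Option Int := match inv.get? n with
          | some im => im.get? nib
          | none => none
        match r? with
        | some i => (some i, some n, [(n, i, "inverse")])
        | none => fallbackA kr (some n) nib inv

-- ===== PORT B =====
-- one sweep over key_mapping_module accumulating (index_hit, nc_hit, matches), then decide
def normalize_key_index_py_alt (key_raw : Option Int) (num_channels : Option Int) (key_mapping_module : List (Int × List (Int × String))) : Option Int × Option Int × (List (Int × Int × String)) :=
  match key_raw with
  | none => (none, num_channels, [])
  | some kr =>
    let nib := pyHexUpper kr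
    let st :=
      (PySem.Dict.ofList (key_mapping_module.map fun p => (p.1, (PySem.Dict.ofList p.2 : PySem.Dict Int String)))).items.foldl
        (fun (st : Option Int × Option (Int × Int) × List (Int × Int × String)) p =>
          -- inner loop: for index, value in mapping.items()
          let inner := p.2.items.foldl
            (fun (s : Option Int × Option Int) q =>
              ((if some p.1 = num_channels ∧ q.1 = kr then some p.1 else s.1),
               (if PySem.Str.upper q.2 == nib then some q.1 else s.2)))
            (st.1, none)
          match inner.2 with
          | some i =>
            (inner.1,
             (if some p.1 = num_channels then some (p.1, i) else st.2.1),
             st.2.2 ++ [(p.1, i, "inverse")])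
          | none => (inner.1, st.2.1, st.2.2))
        (none, none, [])
    match st.1 with
    | some c => (some kr, some c, [(c, kr, "index")])
    | none =>
      match st.2.1 with
      | some ci => (some ci.2, some ci.1, [(ci.1, ci.2, "inverse")])
      | none =>
        match st.2.2 with
        | [m] => (some m.2.1, some m.1, [m])
        | _ => (some kr, num_channels, st.2.2)

-- ===== PRECONDITION & SPEC =====
def Spec_normalize_key_index_py (key_raw : Option Int) (num_channels : Option Int) (key_mapping_module : List (Int × List (Int × String))) (out : Option Int × Option Int × (List (Int × Int × String))) : Prop := out = normalize_key_index_py_alt key_raw num_channels key_mapping_module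
instance (key_raw : Option Int) (num_channels : Option Int) (key_mapping_module : List (Int × List (Int × String))) (out : Option Int × Option Int × (List (Int × Int × String))) : Decidable (Spec_normalize_key_index_py key_raw num_channels key_mapping_module out) := by unfold Spec_normalize_key_index_py; infer_instance

-- ===== CLAIM (what is proved, stated in full; the proofs are below) =====
def Claim_equal_normalize_key_index_py : Prop := ∀ (key_raw : Option Int) (num_channels : Option Int) (key_mapping_module : List (Int × List (Int × String))), Dom_normalize_key_index_py key_raw num_channels key_mapping_module → Spec_normalize_key_index_py key_raw num_channels key_mapping_module (normalize_key_index_py key_raw num_channels key_mapping_module)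

-- ===== LEMMAS AND PROOFS =====

-- proof-side helpers
def lastIndexFor (m : PySem.Dict Int String) (nib : String) : Option Int :=
  m.items.foldl (fun found q => if PySem.Str.upper q.2 == nib then some q.1 else found) none

def msF (d : PySem.Dict Int (PySem.Dict Int String)) (nib : String) : List (Int × Int × String) :=
  d.items.filterMap fun p => (lastIndexFor p.2 nib).map fun i => (p.1, i, "inverse")

def decideMs (kr : Int) (nc : Option Int) (ms : List (Int × Int × String)) :
    Option Int × Option Int × (List (Int × Int × String)) :=
  match ms with
  | [m] => (some m.2.1, some m.1, [m])
  | _ => (some kr, nc, ms)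

def keyStep {β γ : Type} (n : Int) (f : (Int × β) → Option γ) (s : Option γ) (p : Int × β) : Option γ :=
  if p.1 = n then (match f p with | some v => some v | none => s) else s

-- hex-string lemmas
lemma upperChar_hexDigitU (m : Nat) (h : m < 16) : PySem.Chars.upperChar (hexDigitU m) = hexDigitU m := by
  interval_cases m <;> decide

lemma upper_natHexChars (n : Nat) : PySem.Chars.upper (natHexChars n) = natHexChars n := by
  induction n using Nat.strong_induction_on with
  | _ n ih =>
    unfold natHexChars
    split
    · simp [PySem.Chars.upper, upperChar_hexDigitU _ (by omega)]
    · rename_i h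
      have := ih (n / 16) (Nat.div_lt_self (by omega) (by omega))
      simp only [PySem.Chars.upper] at this ⊢
      simp [this, upperChar_hexDigitU (n % 16) (by omega)]

lemma upper_pyHexUpper (k : Int) : PySem.Str.upper (pyHexUpper k) = pyHexUpper k := by
  unfold pyHexUpper PySem.Str.upper
  split
  · have h := upper_natHexChars (-k).toNat
    simp only [PySem.Chars.upper] at h
    simp [PySem.Chars.upper, h, PySem.Chars.upperChar, PySem.Chars.islower]
  · have h := upper_natHexChars k.toNat
    simp only [PySem.Chars.upper] at h
    simp [PySem.Chars.upper, h]

-- A's inverse dict looked up at nib IS the forward last-match scan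
lemma foldl_insert_get (l : List (Int × String)) (a : PySem.Dict String Int) (nib : String) :
    (l.foldl (fun a q => a.insert (PySem.Str.upper q.2) q.1) a).get? nib
      = l.foldl (fun found q => if PySem.Str.upper q.2 == nib then some q.1 else found) (a.get? nib) := by
  induction l generalizing a with
  | nil => rfl
  | cons q t ih =>
    simp only [List.foldl_cons, ih]
    congr 1
    rw [PySem.Dict.get?_insert]
    by_cases h : nib = PySem.Str.upper q.2
    · rw [if_pos h, if_pos (beq_iff_eq.mpr h.symm)]
    · rw [if_neg h, if_neg (by simpa using fun hh => h hh.symm)]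

lemma invertMapping_get? (m : PySem.Dict Int String) (nib : String) :
    (invertMapping m).get? nib = lastIndexFor m nib := by
  unfold invertMapping lastIndexFor
  rw [foldl_insert_get]
  simp [PySem.Dict.get?_empty]

lemma ofList_map_items (d : PySem.Dict Int (PySem.Dict Int String)) (h : d.keys.Nodup) :
    (PySem.Dict.ofList (d.items.map fun p => (p.1, invertMapping p.2))).items
      = d.items.map fun p => (p.1, invertMapping p.2) := by
  unfold PySem.Dict.ofList PySem.Dict.update
  rw [PySem.Dict.items_foldl_insert_fresh (k := Prod.fst) (v := Prod.snd)]
  · simp [PySem.Dict.empty]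
  · intro a _; exact PySem.Dict.contains_empty _
  · simpa [List.map_map, Function.comp, PySem.Dict.keys] using h

lemma inv_get? (d : PySem.Dict Int (PySem.Dict Int String)) (h : d.keys.Nodup) (x : Int) :
    (PySem.Dict.ofList (d.items.map fun p => (p.1, invertMapping p.2))).get? x
      = (d.get? x).map invertMapping := by
  simp only [PySem.Dict.get?, ofList_map_items d h, List.find?_map]
  have : ((fun p : Int × PySem.Dict String Int => p.1 == x) ∘ fun p : Int × PySem.Dict Int String => (p.1, invertMapping p.2))
      = fun p : Int × PySem.Dict Int String => p.1 == x := rfl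
  rw [this]
  cases d.items.find? (fun p => p.1 == x) <;> rfl

-- A's fallback is the decision on msF
lemma fallbackA_eq (kr : Int) (nc : Option Int) (nib : String)
    (d : PySem.Dict Int (PySem.Dict Int String)) (h : d.keys.Nodup) :
    fallbackA kr nc nib (PySem.Dict.ofList (d.items.map fun p => (p.1, invertMapping p.2)))
      = decideMs kr nc (msF d nib) := by
  unfold fallbackA decideMs msF
  rw [ofList_map_items d h, List.filterMap_map]
  have : ((fun p : Int × PySem.Dict String Int =>
            match p.2.get? nib with
            | some i => some (p.1, i, "inverse")
            | none => none) ∘ fun p : Int × PySem.Dict Int String => (p.1, invertMapping p.2))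
      = fun p : Int × PySem.Dict Int String => (lastIndexFor p.2 nib).map fun i => (p.1, i, "inverse") := by
    funext p
    simp only [Function.comp, invertMapping_get?]
    cases lastIndexFor p.2 nib <;> rfl
  rw [this]

-- generic fold lemmas
lemma foldl_pair {α β γ : Type} (l : List γ) (f : α → γ → α) (g : β → γ → β) (a : α) (b : β) :
    l.foldl (fun s q => (f s.1 q, g s.2 q)) (a, b) = (l.foldl f a, l.foldl g b) := by
  induction l generalizing a b with
  | nil => rfl
  | cons q t ih => simp [ih]

lemma foldl_triple {α β γ δ : Type} (l : List δ) (f : α → δ → α) (g : β → δ → β)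
    (h : δ → List γ) (a : α) (b : β) (c : List γ) :
    l.foldl (fun st p => (f st.1 p, g st.2.1 p, st.2.2 ++ h p)) (a, b, c)
      = (l.foldl f a, l.foldl g b, c ++ l.flatMap h) := by
  induction l generalizing a b c with
  | nil => simp
  | cons p t ih => simp [ih]

lemma foldl_set_if {α γ : Type} (l : List γ) (P : γ → Prop) [DecidablePred P] (c : α) (s0 : Option α) :
    l.foldl (fun s q => if P q then some c else s) s0
      = if l.any (fun q => decide (P q)) then some c else s0 := by
  induction l generalizing s0 with
  | nil => simp
  | cons q t ih =>
    by_cases h : P q <;> simp [h, ih]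

lemma flatMap_option_toList {α β : Type} (l : List α) (o : α → Option β) :
    l.flatMap (fun p => (o p).toList) = l.filterMap o := by
  induction l with
  | nil => rfl
  | cons p t ih => cases h : o p <;> simp [h, ih]

lemma foldl_keyStep_absent {β γ : Type} (l : List (Int × β)) (n : Int) (f : (Int × β) → Option γ)
    (s0 : Option γ) (h : ∀ p ∈ l, p.1 ≠ n) :
    l.foldl (keyStep n f) s0 = s0 := by
  induction l generalizing s0 with
  | nil => rfl
  | cons p t ih =>
    simp only [List.foldl_cons, keyStep, if_neg (h p (by simp))]
    exact ih _ (fun q hq => h q (by simp [hq]))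

lemma foldl_keyStep_nodup {β γ : Type} (l : List (Int × β)) (hn : (l.map Prod.fst).Nodup)
    (n : Int) (f : (Int × β) → Option γ) :
    l.foldl (keyStep n f) none = (l.find? (fun p => p.1 == n)).bind f := by
  induction l with
  | nil => rfl
  | cons p t ih =>
    simp only [List.map_cons, List.nodup_cons] at hn
    by_cases h : p.1 = n
    · have habs : ∀ q ∈ t, q.1 ≠ n := by
        intro q hq he
        exact hn.1 (by rw [← he] at h; exact h ▸ List.mem_map_of_mem hq)
      simp only [List.foldl_cons, List.find?_cons, keyStep, if_pos h, beq_iff_eq.mpr h]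
      rw [foldl_keyStep_absent t n f _ habs]
      cases hf : f p <;> simp [hf]
    · simp only [List.foldl_cons, List.find?_cons, keyStep, if_neg h,
        (by simpa using h : (p.1 == n) = false)]
      exact ih hn.2

-- characterization of B's single sweep
lemma scan_eq (nc : Option Int) (kr : Int) (nib : String) (l : List (Int × PySem.Dict Int String)) :
    l.foldl
      (fun (st : Option Int × Option (Int × Int) × List (Int × Int × String)) p =>
        let inner := p.2.items.foldl
          (fun (s : Option Int × Option Int) q =>
            ((if some p.1 = nc ∧ q.1 = kr then some p.1 else s.1),
             (if PySem.Str.upper q.2 == nib then some q.1 else s.2)))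
          (st.1, none)
        match inner.2 with
        | some i =>
          (inner.1, (if some p.1 = nc then some (p.1, i) else st.2.1), st.2.2 ++ [(p.1, i, "inverse")])
        | none => (inner.1, st.2.1, st.2.2))
      (none, none, [])
    = (l.foldl (fun s p => if some p.1 = nc ∧ p.2.items.any (fun q => q.1 == kr) then some p.1 else s) none,
       l.foldl (fun s p => match lastIndexFor p.2 nib with
                           | some i => if some p.1 = nc then some (p.1, i) else s
                           | none => s) none,
       l.filterMap fun p => (lastIndexFor p.2 nib).map fun i => (p.1, i, "inverse")) := by
  have hstep : (fun (st : Option Int × Option (Int × Int) × List (Int × Int × String)) (p : Int × PySem.Dict Int String) =>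
        let inner := p.2.items.foldl
          (fun (s : Option Int × Option Int) q =>
            ((if some p.1 = nc ∧ q.1 = kr then some p.1 else s.1),
             (if PySem.Str.upper q.2 == nib then some q.1 else s.2)))
          (st.1, none)
        match inner.2 with
        | some i =>
          (inner.1, (if some p.1 = nc then some (p.1, i) else st.2.1), st.2.2 ++ [(p.1, i, "inverse")])
        | none => (inner.1, st.2.1, st.2.2))
      = fun st p =>
        ((if some p.1 = nc ∧ p.2.items.any (fun q => q.1 == kr) then some p.1 else st.1),
         (match lastIndexFor p.2 nib with
          | some i => if some p.1 = nc then some (p.1, i) else st.2.1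
          | none => st.2.1),
         st.2.2 ++ ((lastIndexFor p.2 nib).map (fun i => (p.1, i, "inverse"))).toList) := by
    funext st p
    rw [foldl_pair p.2.items
      (fun s q => if some p.1 = nc ∧ q.1 = kr then some p.1 else s)
      (fun s q => if PySem.Str.upper q.2 == nib then some q.1 else s) st.1 none]
    have hidx : p.2.items.foldl (fun s q => if some p.1 = nc ∧ q.1 = kr then some p.1 else s) st.1
        = if some p.1 = nc ∧ p.2.items.any (fun q => q.1 == kr) then some p.1 else st.1 := by
      rw [foldl_set_if p.2.items (fun q => some p.1 = nc ∧ q.1 = kr) p.1 st.1]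
      have hfun : (fun q : Int × String => decide (some p.1 = nc ∧ q.1 = kr))
          = fun q => decide (some p.1 = nc) && (q.1 == kr) := by
        funext q; by_cases hq : q.1 = kr <;> simp [hq]
      simp only [hfun]
      cases hC : decide (some p.1 = nc) with
      | true =>
        have h := of_decide_eq_true hC
        subst h
        simp only [Bool.true_and, true_and]
      | false =>
        have h := of_decide_eq_false hC
        simp [h]
    rw [hidx]
    show _ = (_, _, _)
    cases h : lastIndexFor p.2 nib <;> simp [lastIndexFor] at h <;> simp [h]
  rw [hstep, foldl_triple l
    (fun s p => if some p.1 = nc ∧ p.2.items.any (fun q => q.1 == kr) then some p.1 else s)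
    (fun s p => match lastIndexFor p.2 nib with
                | some i => if some p.1 = nc then some (p.1, i) else s
                | none => s)
    (fun p => ((lastIndexFor p.2 nib).map (fun i => (p.1, i, "inverse"))).toList) none none [],
    flatMap_option_toList]
  simp

-- specializations of the two accumulator folds
lemma idx_fold_none (kr : Int) (l : List (Int × PySem.Dict Int String)) :
    l.foldl (fun s p => if some p.1 = (none : Option Int) ∧ p.2.items.any (fun q => q.1 == kr) then some p.1 else s) none = none := by
  induction l with
  | nil => rfl
  | cons p t ih => simp

lemma nc_fold_none (nib : String) (l : List (Int × PySem.Dict Int String)) :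
    l.foldl (fun s p => match lastIndexFor p.2 nib with
                        | some i => if some p.1 = (none : Option Int) then some (p.1, i) else s
                        | none => s) none = none := by
  induction l with
  | nil => rfl
  | cons p t ih =>
    simp only [List.foldl_cons]
    cases lastIndexFor p.2 nib <;> simpa using ih

lemma idx_fold_some (kr n : Int) (l : List (Int × PySem.Dict Int String)) (hn : (l.map Prod.fst).Nodup) :
    l.foldl (fun s p => if some p.1 = some n ∧ p.2.items.any (fun q => q.1 == kr) then some p.1 else s) none
      = (l.find? (fun p => p.1 == n)).bind (fun p => if p.2.items.any (fun q => q.1 == kr) then some p.1 else none) := by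
  rw [← foldl_keyStep_nodup l hn n _]
  congr 1
  funext s p
  unfold keyStep
  by_cases h : p.1 = n <;> by_cases ha : p.2.items.any (fun q => q.1 == kr) <;> simp [h, ha]

lemma nc_fold_some (nib : String) (n : Int) (l : List (Int × PySem.Dict Int String)) (hn : (l.map Prod.fst).Nodup) :
    l.foldl (fun s p => match lastIndexFor p.2 nib with
                        | some i => if some p.1 = some n then some (p.1, i) else s
                        | none => s) none
      = (l.find? (fun p => p.1 == n)).bind (fun p => (lastIndexFor p.2 nib).map fun i => (p.1, i)) := by
  rw [← foldl_keyStep_nodup l hn n _]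
  congr 1
  funext s p
  unfold keyStep
  by_cases h : p.1 = n <;> cases hl : lastIndexFor p.2 nib <;> simp [h, hl]

-- get?/contains via find?/any over items
lemma get?_eq_find (d : PySem.Dict Int (PySem.Dict Int String)) (n : Int) :
    d.get? n = (d.items.find? (fun p => p.1 == n)).map Prod.snd := by
  simp [PySem.Dict.get?]

lemma contains_eq_any (m : PySem.Dict Int String) (kr : Int) :
    m.contains kr = m.items.any (fun q => q.1 == kr) := by
  rw [PySem.Dict.contains_eq_isSome_get?]
  simp only [PySem.Dict.get?]
  rw [Bool.eq_iff_iff]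
  simp [List.find?_isSome, List.any_eq_true]

-- ===== VERDICT (by name: the statement is the Claim_ definition above) =====
theorem normalize_key_index_py_spec : Claim_equal_normalize_key_index_py := by
  intro key_raw num_channels km _
  unfold Spec_normalize_key_index_py
  cases key_raw with
  | none => rfl
  | some kr =>
    simp only [normalize_key_index_py, normalize_key_index_py_alt]
    have hnd : (PySem.Dict.ofList (km.map fun p => (p.1, (PySem.Dict.ofList p.2 : PySem.Dict Int String)))).keys.Nodup :=
      PySem.Dict.nodup_keys_ofList _
    set d := PySem.Dict.ofList (km.map fun p => (p.1, (PySem.Dict.ofList p.2 : PySem.Dict Int String))) with hd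
    have hndl : (d.items.map Prod.fst).Nodup := hnd
    rw [upper_pyHexUpper, scan_eq num_channels kr (pyHexUpper kr) d.items]
    cases num_channels with
    | none =>
      rw [idx_fold_none, nc_fold_none]
      exact fallbackA_eq kr none (pyHexUpper kr) d hnd
    | some n =>
      rw [idx_fold_some kr n d.items hndl, nc_fold_some (pyHexUpper kr) n d.items hndl]
      have hi := inv_get? d hnd n
      cases hf : d.items.find? (fun p => p.1 == n) with
      | none =>
        have hg : d.get? n = none := by rw [get?_eq_find, hf]; rfl
        rw [hg] at hi
        simp only [hg, hi, Option.bind_none, Option.map_none]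
        exact fallbackA_eq kr (some n) (pyHexUpper kr) d hnd
      | some p =>
        have hpn : p.1 = n := by
          have := List.find?_some hf
          simpa using this
        have hg : d.get? n = some p.2 := by rw [get?_eq_find, hf]; rfl
        rw [hg] at hi
        simp only [hg, hi, Option.bind_some, Option.map_some]
        rw [contains_eq_any]
        cases hc : p.2.items.any (fun q => q.1 == kr) with
        | true =>
          simp [hpn]
        | false =>
          simp only [if_neg Bool.false_ne_true]
          rw [invertMapping_get?]
          cases hl : lastIndexFor p.2 (pyHexUpper kr) with
          | none =>
            simp only [Option.map_none]
            exact fallbackA_eq kr (some n) (pyHexUpper kr) d hnd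
          | some i => simp [hpn]
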